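-- pv_equiv track=rewrite | github.com/sheshanth123/Algorithms | Easy/maximumDifference.py | solve
-- ===== SOURCE A (Python) =====
-- def solve(A, B):
--
--     A.sort()
--
--     lenA = len(A)
--
--     sumA = 0
--
--     for elem in A:
--         sumA += elem
--
--     s1 = 0
--
--     for elemIndex in range(0, B):
--         s1 += A[elemIndex]
--
--     s2 = sumA - s1
--
--     max1 = abs(s1-s2)
--
--     s1=0
--
--     for elemIndex in range(lenA-1,( lenA - B)-1, -1):
--         s1 += A[elemIndex]
--
--     s2 = sumA - s1
--
--     max2 = abs(s1-s2)
--
--     return max(max1, max2)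
-- ===== SOURCE B (Python) =====
-- def sum_k_smallest(k, xs):
--     # sum of the k smallest elements of xs (all of them if k >= len(xs), 0 if k <= 0),
--     # by iterative three-way quickselect partitioning (no sort).
--     total = 0
--     while True:
--         if k <= 0:
--             return total
--         if len(xs) <= k:
--             return total + sum(xs)
--         p = xs[len(xs) // 2]
--         less = [x for x in xs if x < p]
--         neq = sum(1 for x in xs if x == p)
--         if k <= len(less):
--             xs = less
--         elif k <= len(less) + neq:
--             return total + sum(less) + p * (k - len(less))
--         else:
--             total += sum(less) + p * neq
--             k -= len(less) + neq
--             xs = [x for x in xs if x > p]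
--
--
-- def solve(A, B):
--     n = len(A)
--     S = sum(A)
--     s1 = sum_k_smallest(B, A)          # sum of the B smallest
--     t = S - sum_k_smallest(n - B, A)   # sum of the B largest
--     return max(abs(S - 2 * s1), abs(2 * t - S))
-- ===== Notes on version B (the rewrite author's own statement) =====
-- stated objective: alternative
-- what changed: Replaced sort + prefix/suffix index loops by an iterative three-way quickselect (middle-element pivot) that sums the B smallest and, via the complement, the B largest elements without sorting; B also does not mutate its argument while A sorts it in place.
import Mathlib
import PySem

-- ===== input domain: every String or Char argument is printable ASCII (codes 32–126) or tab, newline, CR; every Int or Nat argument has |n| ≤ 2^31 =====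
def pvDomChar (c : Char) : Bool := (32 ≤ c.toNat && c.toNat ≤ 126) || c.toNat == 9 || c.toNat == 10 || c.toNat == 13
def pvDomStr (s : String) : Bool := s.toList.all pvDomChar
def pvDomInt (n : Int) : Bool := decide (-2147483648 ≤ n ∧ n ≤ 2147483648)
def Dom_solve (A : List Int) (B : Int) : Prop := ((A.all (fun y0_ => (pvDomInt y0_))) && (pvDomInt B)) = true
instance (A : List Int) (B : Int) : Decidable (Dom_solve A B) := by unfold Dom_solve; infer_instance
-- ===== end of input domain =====

-- B replaces A's sort-then-prefix/suffix-sum with a three-way quickselect that sums the B smallest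
-- (and, via the complement, the B largest) elements without sorting (objective: alternative algorithm);
-- equivalence is about the RETURN value only: Python A sorts its argument list in place, B does not mutate it.

-- ===== PORT A =====
def solve (A : List Int) (B : Int) : Int :=
  let As := PySem.List.sorted A (fun x => x) false
  let lenA : Int := As.length
  let sumA : Int := As.foldl (fun acc e => acc + e) 0
  let s1 : Int := (PySem.List.pyRange 0 B 1).foldl
    (fun acc i => acc + PySem.List.pyGetD As i 0) 0
  let s2 : Int := sumA - s1
  let max1 : Int := |s1 - s2|
  let s1' : Int := (PySem.List.pyRange (lenA - 1) (lenA - B - 1) (-1)).foldl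
    (fun acc i => acc + PySem.List.pyGetD As i 0) 0
  let s2' : Int := sumA - s1'
  let max2 : Int := |s1' - s2'|
  max max1 max2

-- ===== PORT B =====
-- termination facts for the quickselect recursion (cited by name in decreasing_by)
theorem filter_len_lt (xs : List Int) (f : Int → Bool) (p : Int) (hp : p ∈ xs) (hf : f p = false) :
    (xs.filter f).length < xs.length :=
  List.length_filter_lt_length_iff_exists.mpr ⟨p, hp, by simp [hf]⟩

theorem getD_mem (xs : List Int) (h : xs ≠ []) : xs.getD (xs.length / 2) 0 ∈ xs := by
  have h0 : 0 < xs.length := List.length_pos_iff.mpr h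
  rw [List.getD_eq_getElem?_getD, List.getElem?_eq_getElem (by omega)]
  simp

-- sum of the k smallest elements of xs, iterative three-way quickselect (Source B's sum_k_smallest)
def sumKSmallest (k : Int) (xs : List Int) : Int :=
  if k ≤ 0 then 0
  else if h2 : (xs.length : Int) ≤ k then xs.sum
  else
    let p := xs.getD (xs.length / 2) 0
    let less := xs.filter (fun x => x < p)
    let neq : Int := (xs.filter (fun x => x == p)).length
    if k ≤ (less.length : Int) then sumKSmallest k less
    else if k ≤ (less.length : Int) + neq then less.sum + p * (k - less.length)
    else less.sum + p * neq + sumKSmallest (k - less.length - neq) (xs.filter (fun x => p < x))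
termination_by xs.length
decreasing_by
  all_goals
    have hx : xs ≠ [] := by intro h; subst h; simp at h2; omega
  · rw [List.length_unattach, ← List.countP_eq_length_filter,
      List.countP_attach (p := fun x => decide (x < xs.getD (xs.length / 2) 0)),
      List.countP_eq_length_filter]
    exact filter_len_lt xs _ _ (getD_mem xs hx) (by simp)
  · rw [List.length_unattach, ← List.countP_eq_length_filter,
      List.countP_attach (p := fun x => decide (xs.getD (xs.length / 2) 0 < x)),
      List.countP_eq_length_filter]
    exact filter_len_lt xs _ _ (getD_mem xs hx) (by simp)

def solve_alt (A : List Int) (B : Int) : Int :=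
  let n : Int := A.length
  let S : Int := A.sum
  let s1 := sumKSmallest B A
  let t := S - sumKSmallest (n - B) A
  max |S - 2 * s1| |2 * t - S|

-- ===== PRECONDITION & SPEC =====
-- Python A raises IndexError when B > len(A) (its prefix loop reads A[B-1]); exactly those inputs are excluded.
def Pre_solve (A : List Int) (B : Int) : Prop := B ≤ (A.length : Int)
instance (A : List Int) (B : Int) : Decidable (Pre_solve A B) := by unfold Pre_solve; infer_instance
def pvWitness_solve : List Int × Int := ([3, 1, 2], 2)

def Spec_solve (A : List Int) (B : Int) (out : Int) : Prop := out = solve_alt A B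
instance (A : List Int) (B : Int) (out : Int) : Decidable (Spec_solve A B out) := by unfold Spec_solve; infer_instance

-- ===== CLAIM (what is proved, stated in full; the proofs are below) =====
def Claim_equal_solve : Prop := ∀ (A : List Int) (B : Int), Dom_solve A B → Pre_solve A B → Spec_solve A B (solve A B)

-- ===== LEMMAS AND PROOFS =====
theorem all_eq_sum (l : List Int) (p : Int) (h : ∀ x ∈ l, x = p) : l.sum = p * l.length := by
  induction l with
  | nil => simp
  | cons a t ih =>
    have := h a (by simp)
    simp only [List.sum_cons, List.length_cons, ih (fun x hx => h x (by simp [hx]))]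
    subst this; push_cast; ring

-- the quickselect sum equals the sum of the first k.toNat elements of ANY sorted rearrangement
theorem sumKSmallest_eq_take : ∀ (n : Nat) (xs ys : List Int), xs.length ≤ n →
    ys.Perm xs → ys.Pairwise (· ≤ ·) → ∀ k : Int,
    sumKSmallest k xs = (ys.take k.toNat).sum := by
  intro n
  induction n with
  | zero =>
    intro xs ys hlen hperm _ k
    have hxs : xs = [] := List.eq_nil_of_length_eq_zero (Nat.le_zero.mp hlen)
    subst hxs
    have hys : ys = [] := hperm.eq_nil
    subst hys
    rw [sumKSmallest]
    split_ifs <;> simp <;> omega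
  | succ n ih =>
    intro xs ys hlen hperm hpair k
    rw [sumKSmallest]
    by_cases hk0 : k ≤ 0
    · simp [hk0, Int.toNat_of_nonpos hk0]
    by_cases hkl : (xs.length : Int) ≤ k
    · simp only [if_neg hk0, dif_pos hkl]
      have hle : ys.length ≤ k.toNat := by have := hperm.length_eq; omega
      rw [List.take_of_length_le hle, hperm.sum_eq]
    simp only [if_neg hk0, dif_neg hkl]
    set p := xs.getD (xs.length / 2) 0 with hpdef
    have hxne : xs ≠ [] := by intro h; subst h; simp at hkl; omega
    have hp : p ∈ xs := getD_mem xs hxne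
    set L := xs.filter (fun x => decide (x < p)) with hL
    set E := xs.filter (fun x => x == p) with hE
    set G := xs.filter (fun x => decide (p < x)) with hG
    have hLlt : L.length < xs.length := filter_len_lt xs _ p hp (by simp)
    have hGlt : G.length < xs.length := filter_len_lt xs _ p hp (by simp)
    have hLall : ∀ x ∈ L, x < p := by intro x hx; rw [hL] at hx; simp [List.mem_filter] at hx; exact hx.2
    have hEall : ∀ x ∈ E, x = p := by intro x hx; rw [hE] at hx; simp [List.mem_filter] at hx; exact hx.2
    have hGall : ∀ x ∈ G, p < x := by intro x hx; rw [hG] at hx; simp [List.mem_filter] at hx; exact hx.2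
    set SL := PySem.List.sorted L (fun x => x) false with hSLdef
    set SG := PySem.List.sorted G (fun x => x) false with hSGdef
    have hSLp : SL.Perm L := PySem.List.sorted_perm L (fun x => x) false
    have hSGp : SG.Perm G := PySem.List.sorted_perm G (fun x => x) false
    have hSLs : SL.Pairwise (· ≤ ·) := by simpa using (PySem.List.sorted_pairwise (xs := L) (key := fun x => x))
    have hSGs : SG.Pairwise (· ≤ ·) := by simpa using (PySem.List.sorted_pairwise (xs := G) (key := fun x => x))
    have hpart : (L ++ (E ++ G)).Perm xs := by
      rw [List.perm_iff_count]
      intro a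
      rw [hL, hE, hG]
      simp only [List.count_append]
      have cL0 : ¬ a < p → List.count a (List.filter (fun x => decide (x < p)) xs) = 0 := fun hna =>
        List.count_eq_zero.mpr (fun hmem => by
          have := (List.mem_filter.mp hmem).2; simp at this; omega)
      have cE0 : a ≠ p → List.count a (List.filter (fun x => x == p) xs) = 0 := fun hna =>
        List.count_eq_zero.mpr (fun hmem => by
          have := (List.mem_filter.mp hmem).2; simp at this; omega)
      have cG0 : ¬ p < a → List.count a (List.filter (fun x => decide (p < x)) xs) = 0 := fun hna =>
        List.count_eq_zero.mpr (fun hmem => by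
          have := (List.mem_filter.mp hmem).2; simp at this; omega)
      rcases lt_trichotomy a p with h | h | h
      · rw [List.count_filter (by simp [h]), cE0 (by omega), cG0 (by omega)]
        omega
      · subst h
        rw [cL0 (by omega), cG0 (by omega), List.count_filter (by simp)]
        omega
      · rw [cL0 (by omega), cE0 (by omega), List.count_filter (by simp [h])]
        omega
    have hbig : (SL ++ (E ++ SG)).Pairwise (· ≤ ·) := by
      rw [List.pairwise_append, List.pairwise_append]
      refine ⟨hSLs, ⟨?_, hSGs, ?_⟩, ?_⟩
      · exact List.pairwise_of_forall_mem_list (fun x hx y hy => by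
          rw [hEall x hx, hEall y hy])
      · intro x hx y hy
        have := hEall x hx
        have := hGall y (hSGp.mem_iff.mp hy)
        omega
      · intro x hx y hy
        have hxl := hLall x (hSLp.mem_iff.mp hx)
        rcases List.mem_append.mp hy with h | h
        · have := hEall y h; omega
        · have := hGall y (hSGp.mem_iff.mp h); omega
    have hys : ys = SL ++ (E ++ SG) := by
      exact List.Perm.eq_of_pairwise (fun a b _ _ h1 h2 => le_antisymm h1 h2) hpair hbig
        (hperm.trans (hpart.symm.trans
          ((hSLp.append ((List.Perm.refl E).append hSGp)).symm)))
    have hSLlen : SL.length = L.length := hSLp.length_eq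
    have hSGlen : SG.length = G.length := hSGp.length_eq
    have hlensum : L.length + (E.length + G.length) = xs.length := by
      have := hpart.length_eq; simpa using this
    rw [hys]
    split_ifs with h1 h2
    · rw [List.take_append_of_le_length (by omega : k.toNat ≤ SL.length)]
      exact ih L SL (by omega) hSLp hSLs k
    · rw [List.take_append, List.take_of_length_le (by omega : SL.length ≤ k.toNat),
        List.take_append_of_le_length (by omega : k.toNat - SL.length ≤ E.length),
        List.sum_append, hSLp.sum_eq,
        all_eq_sum (E.take (k.toNat - SL.length)) p
          (fun x hx => hEall x (List.mem_of_mem_take hx)),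
        List.length_take]
      have hcast : ((min (k.toNat - SL.length) E.length : Nat) : Int) = k - L.length := by omega
      rw [hcast]
    · rw [List.take_append, List.take_of_length_le (by omega : SL.length ≤ k.toNat),
        List.take_append, List.take_of_length_le (by omega : E.length ≤ k.toNat - SL.length),
        List.sum_append, List.sum_append, hSLp.sum_eq,
        all_eq_sum E p hEall,
        ih G SG (by omega) hSGp hSGs (k - L.length - E.length)]
      have hcast : (k - (L.length:Int) - (E.length:Int)).toNat = k.toNat - SL.length - E.length := by omega
      rw [hcast]
      ring

theorem foldl_add_eq_sum_map (f : Int → Int) : ∀ (l : List Int) (init : Int),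
    l.foldl (fun acc i => acc + f i) init = init + (l.map f).sum := by
  intro l
  induction l with
  | nil => simp
  | cons a t ih => intro init; simp [List.foldl_cons, ih, add_assoc]

theorem range_map_getD_sum (ys : List Int) : ∀ (m : Nat), m ≤ ys.length →
    ((List.range m).map (fun k : Nat => ys.getD k 0)).sum = (ys.take m).sum := by
  intro m
  induction m with
  | zero => simp
  | succ m ih =>
    intro hm
    rw [List.range_succ, List.map_append, List.sum_append, ih (by omega)]
    have h1 : ys.take (m+1) = ys.take m ++ [ys[m]] := by
      rw [List.take_add_one, List.getElem?_eq_getElem (show m < ys.length by omega)]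
      rfl
    rw [h1, List.sum_append]
    simp [List.getD_eq_getElem?_getD, List.getElem?_eq_getElem (show m < ys.length by omega)]
    rfl

theorem prefix_loop (ys : List Int) (b : Int) (hb : b ≤ (ys.length : Int)) :
    (PySem.List.pyRange 0 b 1).foldl (fun acc i => acc + PySem.List.pyGetD ys i 0) 0
      = (ys.take b.toNat).sum := by
  rw [PySem.List.pyRange_one, foldl_add_eq_sum_map, zero_add, List.map_map]
  have : ((fun i => PySem.List.pyGetD ys i 0) ∘ fun k : Nat => (0 : Int) + ↑k)
      = fun k : Nat => ys.getD k 0 := by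
    funext k; simp [PySem.List.pyGetD_natCast]
  rw [this]
  have hbt : (b - 0).toNat = b.toNat := by omega
  rw [hbt, range_map_getD_sum ys b.toNat (by omega)]

theorem suffix_loop (ys : List Int) (b : Int) (hb : b ≤ (ys.length : Int)) :
    (PySem.List.pyRange ((ys.length : Int) - 1) ((ys.length : Int) - b - 1) (-1)).foldl
        (fun acc i => acc + PySem.List.pyGetD ys i 0) 0
      = (ys.drop ((ys.length : Int) - b).toNat).sum := by
  rw [PySem.List.pyRange_neg_one_eq_reverse, foldl_add_eq_sum_map, zero_add,
    List.map_reverse, List.sum_reverse,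
    show ((ys.length : Int) - b - 1 + 1) = (ys.length : Int) - b by ring,
    show ((ys.length : Int) - 1 + 1) = (ys.length : Int) by ring]
  by_cases hb0 : 0 ≤ b
  · rw [PySem.List.map_pyGetD_pyRange' ys 0 (show (0:Int) ≤ (ys.length : Int) - b by omega)]
  · rw [PySem.List.pyRange_one_eq_nil (by omega), List.drop_eq_nil_of_le (by omega)]
    simp

theorem solve_spec' : ∀ (A : List Int) (B : Int), Pre_solve A B → solve A B = solve_alt A B := by
  intro A B hpre
  unfold Pre_solve at hpre
  unfold solve solve_alt
  dsimp only
  have hperm : (PySem.List.sorted A (fun x => x) false).Perm A :=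
    PySem.List.sorted_perm A (fun x => x) false
  set As := PySem.List.sorted A (fun x => x) false with hAs
  have hpair : As.Pairwise (· ≤ ·) := by
    simpa using PySem.List.sorted_pairwise (xs := A) (key := fun x => x)
  have hlen : As.length = A.length := hperm.length_eq
  have hpre' : B ≤ (As.length : Int) := by rw [hlen]; exact hpre
  have hsum : As.foldl (fun acc e => acc + e) 0 = As.sum := by
    simpa using foldl_add_eq_sum_map (fun x => x) As 0
  rw [hsum, prefix_loop As B hpre', suffix_loop As B hpre', hlen,
    sumKSmallest_eq_take A.length A As le_rfl hperm hpair B,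
    sumKSmallest_eq_take A.length A As le_rfl hperm hpair ((A.length : Int) - B),
    ← hperm.sum_eq]
  set m := ((A.length : Int) - B).toNat
  set P := (As.take B.toNat).sum
  set Qt := (As.take m).sum
  set Qd := (As.drop m).sum
  have hsplit : Qt + Qd = As.sum := by rw [← List.sum_append, List.take_append_drop]
  rw [show P - (As.sum - P) = -(As.sum - 2 * P) by ring, abs_neg,
    show Qd - (As.sum - Qd) = 2 * Qd - As.sum by ring,
    show 2 * (As.sum - Qt) - As.sum = 2 * Qd - As.sum by omega]

-- ===== VERDICT (by name: the statement is the Claim_ definition above) =====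
theorem solve_spec : Claim_equal_solve := by
  intro A B _ hpre
  exact solve_spec' A B hpre
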